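-- pv_equiv track=rewrite | github.com/Matthew-Manalili/Formative4_Manalili | Formative4_Manalili.py | telephone_decipher
-- ===== SOURCE A (Python) =====
-- def telephone_decipher(telephone_string):
--     deciphered_message=""
--     index=0
--     letter=""
--     decipher_dict = {
--         "0":" ",
--         '2': 'A',
--         '22': 'B',
--         '222': 'C',
--         '3': 'D',
--         '33': 'E',
--         '333': 'F',
--         '4': 'G',
--         '44': 'H',
--         '444': 'I',
--         '5': 'J',
--         '55': 'K',
--         '555': 'L',
--         '6': 'M',
--         '66': 'N',
--         '666': 'O',
--         '7': 'P',
--         '77': 'Q',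
--         '777': 'R',
--         '7777': 'S',
--         '8': 'T',
--         '88': 'U',
--         '888': 'V',
--         '9': 'W',
--         '99': 'X',
--         '999': 'Y',
--         '9999': 'Z'
--     }
--     while index!=len(telephone_string):
--         if index!=0:
--             if telephone_string[index-1]==telephone_string[index]:
--                     letter+=telephone_string[index]
--             else:
--                 if index==len(telephone_string)-1:
--                     letter+=telephone_string[index]
--                 else:
--                     if telephone_string[index]==telephone_string[index+1]:
--                         letter+=telephone_string[index]
--                     else:
--                         letter+=telephone_string[index]
--         else:
--             letter+=telephone_string[index]
--
--         if telephone_string[index]!="_":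
--             if index==len(telephone_string)-1:
--                 deciphered_message+=decipher_dict[letter]
--             else:
--                 if telephone_string[index]!=telephone_string[index+1]:
--                     deciphered_message+=decipher_dict[letter]
--                     letter=""
--         else:
--             deciphered_message+=""
--             letter=""
--         index+=1
--     return deciphered_message
-- ===== SOURCE B (Python) =====
-- def telephone_decipher(telephone_string):
--     decipher_dict = {
--         "0": " ",
--         '2': 'A', '22': 'B', '222': 'C',
--         '3': 'D', '33': 'E', '333': 'F',
--         '4': 'G', '44': 'H', '444': 'I',
--         '5': 'J', '55': 'K', '555': 'L',
--         '6': 'M', '66': 'N', '666': 'O',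
--         '7': 'P', '77': 'Q', '777': 'R', '7777': 'S',
--         '8': 'T', '88': 'U', '888': 'V',
--         '9': 'W', '99': 'X', '999': 'Y', '9999': 'Z'
--     }
--     # one pass: group the string into maximal runs of equal characters
--     runs = []
--     for ch in telephone_string:
--         if runs and runs[-1][0] == ch:
--             runs[-1][1] += 1
--         else:
--             runs.append([ch, 1])
--     # '_' runs are separators; every other run is a dictionary key
--     return ''.join(decipher_dict[ch * n] for ch, n in runs if ch != '_')
-- ===== Notes on version B (the rewrite author's own statement) =====
-- stated objective: simpler
-- what changed: Replaced A's index-based state machine with look-behind/look-ahead comparisons by a two-phase decomposition: group the string into maximal runs of equal characters in one pass, then map each non-'_' run through the keypad dictionary and join.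
import Mathlib
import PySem

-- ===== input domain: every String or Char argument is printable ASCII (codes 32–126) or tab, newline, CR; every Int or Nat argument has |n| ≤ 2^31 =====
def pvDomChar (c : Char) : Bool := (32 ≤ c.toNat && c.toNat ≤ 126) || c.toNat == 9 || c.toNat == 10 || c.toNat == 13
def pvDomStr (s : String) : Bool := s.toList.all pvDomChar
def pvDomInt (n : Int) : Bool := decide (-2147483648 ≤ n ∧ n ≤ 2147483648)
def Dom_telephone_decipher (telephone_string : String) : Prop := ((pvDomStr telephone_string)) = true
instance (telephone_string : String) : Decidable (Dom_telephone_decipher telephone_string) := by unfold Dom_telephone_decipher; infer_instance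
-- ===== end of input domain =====

-- B replaces A's index/look-ahead state machine by run-grouping then a dictionary map (objective: simpler).

-- The keypad dictionary, identical in both Pythons.
def decipherDict : PySem.Dict String String :=
  PySem.Dict.ofList [("0", " "),
   ("2", "A"), ("22", "B"), ("222", "C"),
   ("3", "D"), ("33", "E"), ("333", "F"),
   ("4", "G"), ("44", "H"), ("444", "I"),
   ("5", "J"), ("55", "K"), ("555", "L"),
   ("6", "M"), ("66", "N"), ("666", "O"),
   ("7", "P"), ("77", "Q"), ("777", "R"), ("7777", "S"),
   ("8", "T"), ("88", "U"), ("888", "V"),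
   ("9", "W"), ("99", "X"), ("999", "Y"), ("9999", "Z")]

-- decipher_dict[key]; Python raises KeyError on a missing key — exactly those inputs are outside Pre_.
def lookupKey (key : List Char) : List Char :=
  (PySem.Dict.getD decipherDict (String.ofList key) "").toList

-- ===== PORT A =====
-- A's letter-building block: every branch appends the current character (as in A's code).
def letterStep (s : List Char) (index : Nat) (letter : List Char) : List Char :=
  if index ≠ 0 then
    if s.getD (index - 1) ' ' = s.getD index ' ' then letter ++ [s.getD index ' ']
    else if index = s.length - 1 then letter ++ [s.getD index ' ']
    else if s.getD index ' ' = s.getD (index + 1) ' ' then letter ++ [s.getD index ' ']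
    else letter ++ [s.getD index ' ']
  else letter ++ [s.getD index ' ']

-- A's while loop: `fuel` is only a totality guard (the loop runs exactly length iterations).
def aLoop (s : List Char) : Nat → Nat → List Char → List Char → List Char
  | fuel, index, letter, msg =>
    if index = s.length then msg
    else
      match fuel with
      | 0 => msg  -- unreachable totality guard
      | fuel + 1 =>
        if s.getD index ' ' ≠ '_' then
          if index = s.length - 1 then
            aLoop s fuel (index + 1) (letterStep s index letter)
              (msg ++ lookupKey (letterStep s index letter))
          else if s.getD index ' ' ≠ s.getD (index + 1) ' ' then
            aLoop s fuel (index + 1) [] (msg ++ lookupKey (letterStep s index letter))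
          else
            aLoop s fuel (index + 1) (letterStep s index letter) msg
        else
          aLoop s fuel (index + 1) [] msg

def telephone_decipher (telephone_string : String) : String :=
  String.ofList (aLoop telephone_string.toList telephone_string.toList.length 0 [] [])

-- ===== PORT B =====
-- run grouping, left to right: `go c n l` carries the current run (char c, length n so far)
def goRuns (c : Char) (n : Nat) : List Char → List (Char × Nat)
  | [] => [(c, n)]
  | d :: rest => if d = c then goRuns c (n + 1) rest else (c, n) :: goRuns d 1 rest

def runsOf : List Char → List (Char × Nat)
  | [] => []
  | c :: rest => goRuns c 1 rest

-- ''.join(decipher_dict[ch * n] for ch, n in runs if ch != '_')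
def emitRuns : List (Char × Nat) → List Char
  | [] => []
  | (c, n) :: rs => if c ≠ '_' then lookupKey (List.replicate n c) ++ emitRuns rs else emitRuns rs

def telephone_decipher_alt (telephone_string : String) : String :=
  String.ofList (emitRuns (runsOf telephone_string.toList))

-- ===== PRECONDITION & SPEC =====
def maxRunLen (c : Char) : Nat := if c = '0' then 1 else if c = '7' ∨ c = '9' then 4 else 3

-- Pre_ excludes exactly the inputs on which Python A raises KeyError: a character outside
-- the keypad alphabet (the digits of the dictionary keys plus the underscore separator), or a
-- run of a digit longer than its dictionary keys allow; underscore runs may have any length.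
def Pre_telephone_decipher (telephone_string : String) : Prop :=
  (telephone_string.toList.all (fun c => "023456789_".toList.contains c) = true) ∧
  ((List.range telephone_string.toList.length).all (fun i =>
      (telephone_string.toList.getD i ' ' == '_') ||
      !((List.range (maxRunLen (telephone_string.toList.getD i ' ') + 1)).all (fun j =>
          telephone_string.toList.getD (i + j) ' ' == telephone_string.toList.getD i ' '))) = true)

instance (telephone_string : String) : Decidable (Pre_telephone_decipher telephone_string) := by
  unfold Pre_telephone_decipher; infer_instance

def pvWitness_telephone_decipher : String := "4433555_555666"

def Spec_telephone_decipher (telephone_string : String) (out : String) : Prop := out = telephone_decipher_alt telephone_string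
instance (telephone_string : String) (out : String) : Decidable (Spec_telephone_decipher telephone_string out) := by unfold Spec_telephone_decipher; infer_instance

-- ===== CLAIM (what is proved, stated in full; the proofs are below) =====
def Claim_equal_telephone_decipher : Prop := ∀ (telephone_string : String), Dom_telephone_decipher telephone_string → Pre_telephone_decipher telephone_string → Spec_telephone_decipher telephone_string (telephone_decipher telephone_string)

-- ===== LEMMAS AND PROOFS =====

theorem letterStep_eq (s : List Char) (index : Nat) (letter : List Char) :
    letterStep s index letter = letter ++ [s.getD index ' '] := by
  unfold letterStep; split_ifs <;> rfl

-- A's loop as structural recursion on the remaining suffix (proof-only intermediate form)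
def procSuffix : List Char → List Char → List Char
  | _, [] => []
  | letter, [c] => if c = '_' then [] else lookupKey (letter ++ [c])
  | letter, c :: d :: rest =>
    if c = '_' then procSuffix [] (d :: rest)
    else if c = d then procSuffix (letter ++ [c]) (d :: rest)
    else lookupKey (letter ++ [c]) ++ procSuffix [] (d :: rest)

theorem aLoop_eq_proc (s : List Char) :
    ∀ (fuel index : Nat) (letter msg : List Char),
      index ≤ s.length → s.length ≤ fuel + index →
      aLoop s fuel index letter msg = msg ++ procSuffix letter (s.drop index) := by
  intro fuel
  induction fuel with
  | zero =>
    intro index letter msg hle hfu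
    have : index = s.length := le_antisymm hle (by omega)
    subst this
    simp [aLoop, procSuffix]
  | succ fuel ih =>
    intro index letter msg hle hfu
    by_cases hidx : index = s.length
    · subst hidx; simp [aLoop, procSuffix]
    · have hlt : index < s.length := lt_of_le_of_ne hle hidx
      have hdrop : s.drop index = s[index] :: s.drop (index + 1) :=
        (List.getElem_cons_drop hlt).symm
      have hget : s.getD index ' ' = s[index] := List.getD_eq_getElem s ' ' hlt
      have hq : s[index]? = some s[index] := List.getElem?_eq_getElem hlt
      rw [aLoop]
      rw [if_neg hidx]
      by_cases hund : s[index] = '_'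
      · -- current char is '_' : reset, emit nothing
        rw [if_neg (by simp [hq, hund])]
        rw [ih (index + 1) [] msg (by omega) (by omega)]
        rw [hdrop, hund]
        rcases hrest : s.drop (index + 1) with _ | ⟨d, rest⟩
        · simp [procSuffix]
        · simp [procSuffix]
      · rw [if_pos (by simp [hq, hund])]
        by_cases hlast : index = s.length - 1
        · -- last character, not '_': emit dict[letter + c]
          have hdrop1 : s.drop (index + 1) = [] := by
            apply List.drop_eq_nil_of_le; omega
          rw [if_pos hlast]
          rw [ih (index + 1) _ _ (by omega) (by omega)]
          rw [hdrop1, hdrop, hdrop1, letterStep_eq, hget]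
          simp [procSuffix, hund]
        · -- middle character
          have hlt1 : index + 1 < s.length := by omega
          have hdrop1 : s.drop (index + 1) = s[index + 1] :: s.drop (index + 2) :=
            (List.getElem_cons_drop hlt1).symm
          have hget1 : s.getD (index + 1) ' ' = s[index + 1] := List.getD_eq_getElem s ' ' hlt1
          have hq1 : s[index + 1]? = some s[index + 1] := List.getElem?_eq_getElem hlt1
          rw [if_neg hlast]
          by_cases hnext : s[index] = s[index + 1]
          · rw [if_neg (by simp [hq, hq1, hnext])]
            rw [ih (index + 1) _ _ (by omega) (by omega), letterStep_eq, hget]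
            rw [hdrop, hdrop1]
            simp only [procSuffix]
            rw [if_neg hund, if_pos hnext, ← hdrop1]
          · rw [if_pos (by simp [hq, hq1, hnext])]
            rw [ih (index + 1) _ _ (by omega) (by omega), letterStep_eq, hget]
            rw [hdrop, hdrop1]
            simp only [procSuffix]
            rw [if_neg hund, if_neg hnext, ← hdrop1]
            simp [List.append_assoc]

-- the emitted text of a '_' run does not depend on its recorded length
theorem emit_go_underscore : ∀ (l : List Char) (m m' : Nat),
    emitRuns (goRuns '_' m l) = emitRuns (goRuns '_' m' l) := by
  intro l
  induction l with
  | nil => intro m m'; simp [goRuns, emitRuns]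
  | cons d rest ih =>
    intro m m'
    by_cases hd : d = '_'
    · simp [goRuns, hd, ih (m + 1) (m' + 1)]
    · simp [goRuns, hd, emitRuns]

theorem proc_eq_emit : ∀ (l : List Char) (c : Char) (k : Nat),
    procSuffix (List.replicate k c) (c :: l) = emitRuns (goRuns c (k + 1) l) := by
  intro l
  induction l with
  | nil =>
    intro c k
    by_cases hc : c = '_'
    · simp [procSuffix, goRuns, emitRuns, hc]
    · simp [procSuffix, goRuns, emitRuns, hc, ← List.replicate_succ']
  | cons d rest ih =>
    intro c k
    by_cases hc : c = '_'
    · subst hc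
      by_cases hd : d = '_'
      · subst hd
        have h1 : procSuffix (List.replicate k '_') ('_' :: '_' :: rest) =
            procSuffix (List.replicate 0 '_') ('_' :: rest) := by
          rw [procSuffix, if_pos rfl]; rfl
        rw [h1, ih '_' 0]
        rw [goRuns, if_pos rfl]
        exact emit_go_underscore rest (0 + 1) (k + 1 + 1)
      · have h1 : procSuffix (List.replicate k '_') ('_' :: d :: rest) =
            procSuffix (List.replicate 0 d) (d :: rest) := by
          rw [procSuffix, if_pos rfl]; rfl
        rw [h1, ih d 0]
        rw [goRuns, if_neg hd]
        simp [emitRuns]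
    · by_cases hd : d = c
      · subst hd
        have h1 : procSuffix (List.replicate k d) (d :: d :: rest) =
            procSuffix (List.replicate (k + 1) d) (d :: rest) := by
          rw [procSuffix, if_neg hc, if_pos rfl, ← List.replicate_succ']
        rw [h1, ih d (k + 1)]
        rw [goRuns, if_pos rfl]
      · have h1 : procSuffix (List.replicate k c) (c :: d :: rest) =
            lookupKey (List.replicate (k + 1) c) ++ procSuffix (List.replicate 0 d) (d :: rest) := by
          rw [procSuffix, if_neg hc, if_neg (fun h => hd h.symm), ← List.replicate_succ']; rfl
        rw [h1, ih d 0]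
        rw [goRuns, if_neg hd]
        simp [emitRuns, hc]

theorem ports_agree (s : String) : telephone_decipher s = telephone_decipher_alt s := by
  unfold telephone_decipher telephone_decipher_alt
  rw [aLoop_eq_proc s.toList s.toList.length 0 [] [] (by omega) (by omega)]
  rcases h : s.toList with _ | ⟨c, rest⟩
  · simp [procSuffix, runsOf, emitRuns]
  · simp only [List.drop_zero, List.nil_append, runsOf]
    exact congrArg String.ofList (proc_eq_emit rest c 0)

-- ===== VERDICT (by name: the statement is the Claim_ definition above) =====
theorem telephone_decipher_spec : Claim_equal_telephone_decipher := by
  intro s _ _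
  unfold Spec_telephone_decipher
  exact ports_agree s
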